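-- pv_equiv track=rewrite | github.com/Toralis-Labs/Aortic-Dynamics-Model | oldcodes/orienting#3cleaned.py | collect_rooted_subtree_nodes
-- ===== SOURCE A (Python) =====
-- from typing import TYPE_CHECKING, Any, Dict, List, Optional, Tuple, Iterable, Set
--
-- def collect_rooted_subtree_nodes(child_map: Dict[int, List[int]], start: int) -> Set[int]:
--     start = int(start)
--     seen: Set[int] = set()
--     stack = [start]
--     while stack:
--         u = int(stack.pop())
--         if u in seen:
--             continue
--         seen.add(u)
--         for v in child_map.get(u, []):
--             if int(v) not in seen:
--                 stack.append(int(v))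
--     return seen
-- ===== SOURCE B (Python) =====
-- # Purely functional recursive DFS: two mutually recursive helpers thread an
-- # immutable seen-set through the calls instead of A's explicit worklist stack.
-- def collect_rooted_subtree_nodes(child_map, start):
--     def visit(u, seen):
--         u = int(u)
--         if u not in seen:
--             return visit_each(list(reversed(child_map.get(u, []))), seen | {u})
--         return seen
--
--     def visit_each(children, seen):
--         if children:
--             return visit_each(children[1:], visit(children[0], seen))
--         return seen
--
--     return visit(start, set())
-- ===== Notes on version B (the rewrite author's own statement) =====
-- stated objective: alternative
-- what changed: Replaced the imperative worklist-stack loop that mutates a seen set by a pair of mutually recursive functional helpers (visit / visit_each) that thread an immutable seen set through the call stack, visiting children in reverse so insertion order matches A's pop order.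
import Mathlib
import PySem

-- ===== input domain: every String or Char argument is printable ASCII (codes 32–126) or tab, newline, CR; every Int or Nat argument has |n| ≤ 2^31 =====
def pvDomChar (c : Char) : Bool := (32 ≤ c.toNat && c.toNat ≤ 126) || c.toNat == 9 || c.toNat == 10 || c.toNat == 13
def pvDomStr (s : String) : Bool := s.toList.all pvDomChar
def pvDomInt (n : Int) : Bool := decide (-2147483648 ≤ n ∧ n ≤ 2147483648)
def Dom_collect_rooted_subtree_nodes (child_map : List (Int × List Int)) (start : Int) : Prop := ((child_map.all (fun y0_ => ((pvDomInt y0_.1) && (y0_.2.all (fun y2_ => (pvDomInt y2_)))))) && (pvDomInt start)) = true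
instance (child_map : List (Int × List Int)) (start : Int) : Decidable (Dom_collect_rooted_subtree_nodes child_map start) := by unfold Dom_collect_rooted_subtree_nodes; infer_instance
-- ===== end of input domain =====

-- B replaces A's imperative worklist-stack loop by two mutually recursive functional
-- helpers (visit / visit_each) threading an immutable seen set; objective: alternative.

-- child_map.get(u, [])  (shared lookup helper; both Pythons call it identically)
def pvChildren (child_map : List (Int × List Int)) (u : Int) : List Int :=
  PySem.Dict.getD (PySem.Dict.mk child_map) u []

-- ===== PORT A =====
-- totality guard only: the loop pops at most 1 + (total number of child entries) times
def pvFuelA (child_map : List (Int × List Int)) : Nat :=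
  2 + (child_map.map (fun p => p.2.length)).sum

-- the Python stack with its TOP as list head: 'stack.pop()' = head, the append-loop
-- 'for v in children: if v not in seen: stack.append(v)' prepends the filtered children reversed
def pvLoopA (child_map : List (Int × List Int)) :
    Nat → List Int → PySem.Set Int → PySem.Set Int
  | 0, _, seen => seen
  | _ + 1, [], seen => seen
  | f + 1, u :: st, seen =>
      if PySem.Set.contains seen u then pvLoopA child_map f st seen
      else
        let seen' := PySem.Set.add seen u
        pvLoopA child_map f
          ((((pvChildren child_map u).filter
              (fun v => !(PySem.Set.contains seen' v))).reverse) ++ st) seen'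

def collect_rooted_subtree_nodes (child_map : List (Int × List Int)) (start : Int) : List Int :=
  pvLoopA child_map (pvFuelA child_map) [start] PySem.Set.empty

-- ===== PORT B =====
-- totality guard only: the recursion nests at most 1 + (number of nodes mentioned) deep
def pvFuelB (child_map : List (Int × List Int)) : Nat :=
  2 + (child_map.flatMap (fun q => q.1 :: q.2)).length

-- the mutually recursive helpers 'visit' and 'visit_each' of Source B
mutual
def pvVisit (g : List (Int × List Int)) : Nat → Int → PySem.Set Int → PySem.Set Int
  | 0, _, acc => acc
  | n + 1, u, acc =>
      if !(PySem.Set.contains acc u) then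
        pvVisitEach g n ((pvChildren g u).reverse) (PySem.Set.add acc u)
      else acc
termination_by n _ _ => (n, 0)

def pvVisitEach (g : List (Int × List Int)) : Nat → List Int → PySem.Set Int → PySem.Set Int
  | n, c :: cs, acc => pvVisitEach g n cs (pvVisit g n c acc)
  | _, [], acc => acc
termination_by n cs _ => (n, cs.length + 1)
end

def collect_rooted_subtree_nodes_alt (child_map : List (Int × List Int)) (start : Int) : List Int :=
  pvVisit child_map (pvFuelB child_map) start PySem.Set.empty

-- ===== PRECONDITION & SPEC =====
def Spec_collect_rooted_subtree_nodes (child_map : List (Int × List Int)) (start : Int) (out : List Int) : Prop := out = collect_rooted_subtree_nodes_alt child_map start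
instance (child_map : List (Int × List Int)) (start : Int) (out : List Int) : Decidable (Spec_collect_rooted_subtree_nodes child_map start out) := by unfold Spec_collect_rooted_subtree_nodes; infer_instance

-- ===== CLAIM (what is proved, stated in full; the proofs are below) =====
def Claim_equal_collect_rooted_subtree_nodes : Prop := ∀ (child_map : List (Int × List Int)) (start : Int), Dom_collect_rooted_subtree_nodes child_map start → Spec_collect_rooted_subtree_nodes child_map start (collect_rooted_subtree_nodes child_map start)

-- ===== LEMMAS AND PROOFS =====

lemma pvVisit_zero (g : List (Int × List Int)) (u : Int) (acc : PySem.Set Int) :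
    pvVisit g 0 u acc = acc := by rw [pvVisit]

lemma pvVisitEach_eq_foldl (g : List (Int × List Int)) (n : Nat) :
    ∀ (cs : List Int) (acc : PySem.Set Int),
      pvVisitEach g n cs acc = cs.foldl (fun s v => pvVisit g n v s) acc := by
  intro cs
  induction cs with
  | nil => intro acc; simp [pvVisitEach]
  | cons c cs ih => intro acc; rw [pvVisitEach, List.foldl_cons, ih]

-- the same unfolding shape as the A-side loop body uses
lemma pvVisit_succ (g : List (Int × List Int)) (n : Nat) (u : Int) (acc : PySem.Set Int) :
    pvVisit g (n + 1) u acc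
      = if PySem.Set.contains acc u then acc
        else ((pvChildren g u).reverse).foldl (fun s v => pvVisit g n v s)
          (PySem.Set.add acc u) := by
  rw [pvVisit]
  cases h : PySem.Set.contains acc u
  · simpa using pvVisitEach_eq_foldl g n ((pvChildren g u).reverse) (PySem.Set.add acc u)
  · simp

-- every node mentioned by child_map (or start itself)
def pvUniv (child_map : List (Int × List Int)) (start : Int) : Finset Int :=
  (start :: child_map.flatMap (fun p => p.1 :: p.2)).toFinset

-- unseen-node count: drives the DFS induction
def pvM (child_map : List (Int × List Int)) (start : Int) (s : List Int) : Nat :=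
  ((pvUniv child_map start).filter (fun x => x ∉ s)).card

-- child entries of not-yet-seen keys: bounds the number of future stack pushes
def pvC (child_map : List (Int × List Int)) (s : List Int) : Nat :=
  (((child_map.filter (fun p => !(s.contains p.1))).map (fun p => p.2.length))).sum

lemma pvChildren_mem (child_map : List (Int × List Int)) (u v : Int)
    (h : v ∈ pvChildren child_map u) : v ∈ child_map.flatMap (fun p => p.1 :: p.2) := by
  induction child_map with
  | nil => simp [pvChildren, PySem.Dict.getD, PySem.Dict.get?] at h
  | cons p rest ih =>
    rw [pvChildren, PySem.Dict.getD, PySem.Dict.get?_mk_cons] at h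
    by_cases hp : (p.1 == u) = true
    · rw [if_pos hp] at h
      simp only [Option.getD_some] at h
      simp only [List.flatMap_cons, List.mem_append, List.mem_cons]
      tauto
    · rw [if_neg hp] at h
      have hrest : v ∈ pvChildren rest u := h
      have := ih hrest
      simp only [List.flatMap_cons, List.mem_append, List.mem_cons]
      tauto

lemma pvVisit_mono (child_map : List (Int × List Int)) :
    ∀ (f : Nat) (u : Int) (s : PySem.Set Int) (x : Int),
      x ∈ s → x ∈ pvVisit child_map f u s := by
  intro f
  induction f with
  | zero => intro u s x hx; simpa [pvVisit_zero] using hx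
  | succ f ih =>
    intro u s x hx
    rw [pvVisit_succ]
    split
    · exact hx
    · have hfold : ∀ (l : List Int) (s' : PySem.Set Int), x ∈ s' →
          x ∈ l.foldl (fun s v => pvVisit child_map f v s) s' := by
        intro l
        induction l with
        | nil => intro s' hs'; simpa using hs'
        | cons v vs ihl => intro s' hs'; exact ihl _ (ih v s' x hs')
      exact hfold _ _ ((PySem.Set.mem_add s u x).mpr (Or.inl hx))

lemma pvVisit_of_mem (child_map : List (Int × List Int)) (f : Nat) (u : Int)
    (s : PySem.Set Int) (h : u ∈ s) : pvVisit child_map f u s = s := by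
  cases f with
  | zero => exact pvVisit_zero _ _ _
  | succ f => rw [pvVisit_succ]; simp [PySem.Set.contains, h]

-- dropping already-seen elements before the fold changes nothing: visit of a seen node is id
lemma pvFold_filter (child_map : List (Int × List Int)) (f : Nat) (s0 : List Int) :
    ∀ (l : List Int) (s : PySem.Set Int), (∀ x ∈ s0, x ∈ s) →
      (l.filter (fun v => !(s0.contains v))).foldl (fun s v => pvVisit child_map f v s) s
        = l.foldl (fun s v => pvVisit child_map f v s) s := by
  intro l
  induction l with
  | nil => intro s _; rfl
  | cons v vs ihl =>
    intro s hs
    by_cases hv : v ∈ s0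
    · have : (s0.contains v) = true := by simpa using hv
      simp only [List.filter, this, Bool.not_true]
      rw [List.foldl_cons, pvVisit_of_mem child_map f v s (hs v hv)]
      exact ihl s hs
    · have : (s0.contains v) = false := by simpa using hv
      simp only [List.filter, this, Bool.not_false, List.foldl_cons]
      exact ihl _ (fun x hx => pvVisit_mono child_map f v s x (hs x hx))

lemma pvC_mono (child_map : List (Int × List Int)) (s s' : List Int)
    (h : ∀ x ∈ s, x ∈ s') : pvC child_map s' ≤ pvC child_map s := by
  induction child_map with
  | nil => simp [pvC]
  | cons p rest ih =>
    simp only [pvC, List.filter_cons, List.contains_eq_mem] at ih ⊢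
    by_cases hp : p.1 ∈ s
    · have hp' : p.1 ∈ s' := h _ hp
      simp only [hp, hp', decide_true, Bool.not_true,
        Bool.false_eq_true, if_false]
      exact ih
    · by_cases hp' : p.1 ∈ s'
      · simp only [hp, hp', decide_true, decide_false,
          Bool.not_true, Bool.not_false, if_true, Bool.false_eq_true, if_false,
          List.map_cons, List.sum_cons]
        omega
      · simp only [hp, hp', decide_false, Bool.not_false,
          if_true, List.map_cons, List.sum_cons]
        omega

lemma pvC_drop (child_map : List (Int × List Int)) (s : List Int) (c : Int) (hc : c ∉ s) :
    pvC child_map (s ++ [c]) + (pvChildren child_map c).length ≤ pvC child_map s := by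
  induction child_map with
  | nil => simp [pvC, pvChildren, PySem.Dict.getD, PySem.Dict.get?]
  | cons p rest ih =>
    have hch : pvChildren (p :: rest) c
        = if (p.1 == c) = true then p.2 else pvChildren rest c := by
      rw [pvChildren, PySem.Dict.getD, PySem.Dict.get?_mk_cons]
      split <;> simp [pvChildren, PySem.Dict.getD]
    by_cases hpc : p.1 = c
    · have hp1 : p.1 ∉ s := by rw [hpc]; exact hc
      have hp2 : p.1 ∈ s ++ [c] := by simp [hpc]
      have hmono : pvC rest (s ++ [c]) ≤ pvC rest s :=
        pvC_mono rest s (s ++ [c]) (fun x hx => by simp [hx])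
      rw [hch, if_pos (by simpa using hpc)]
      simp only [pvC, List.filter_cons, hp1, hp2, List.contains_eq_mem,
        decide_true, decide_false, Bool.not_true, Bool.not_false, if_true,
        Bool.false_eq_true, if_false, List.map_cons, List.sum_cons] at ih ⊢
      simp only [pvC] at hmono
      omega
    · rw [hch, if_neg (by simpa using hpc)]
      have hcc : p.1 ∈ s ++ [c] ↔ p.1 ∈ s := by simp [hpc]
      by_cases hp : p.1 ∈ s
      · have hp2 : p.1 ∈ s ++ [c] := hcc.mpr hp
        simp only [pvC, List.filter_cons, hp, hp2, List.contains_eq_mem,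
          decide_true, Bool.not_true, Bool.false_eq_true, if_false] at ih ⊢
        exact ih
      · have hp2 : p.1 ∉ s ++ [c] := fun hx => hp (hcc.mp hx)
        simp only [pvC, List.filter_cons, hp, hp2, List.contains_eq_mem,
          decide_false, Bool.not_false, if_true, List.map_cons, List.sum_cons] at ih ⊢
        omega

lemma pvM_mono (child_map : List (Int × List Int)) (start : Int) (s s' : List Int)
    (h : ∀ x ∈ s, x ∈ s') : pvM child_map start s' ≤ pvM child_map start s := by
  apply Finset.card_le_card
  intro x hx
  simp only [Finset.mem_filter] at hx ⊢
  exact ⟨hx.1, fun hxs => hx.2 (h x hxs)⟩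

lemma pvM_drop (child_map : List (Int × List Int)) (start : Int) (s : List Int) (c : Int)
    (hU : c ∈ pvUniv child_map start) (hc : c ∉ s) :
    pvM child_map start (s ++ [c]) < pvM child_map start s := by
  apply Finset.card_lt_card
  constructor
  · intro x hx
    simp only [Finset.mem_filter, List.mem_append] at hx ⊢
    exact ⟨hx.1, fun hxs => hx.2 (Or.inl hxs)⟩
  · intro hsup
    have hcmem : c ∈ (pvUniv child_map start).filter (fun x => x ∉ s) :=
      Finset.mem_filter.mpr ⟨hU, hc⟩
    have := hsup hcmem
    simp [Finset.mem_filter] at this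

lemma pvLoopA_fuel (child_map : List (Int × List Int)) :
    ∀ (f g : Nat) (st : List Int) (s : PySem.Set Int),
      st.length + pvC child_map s < f → st.length + pvC child_map s < g →
      pvLoopA child_map f st s = pvLoopA child_map g st s := by
  intro f
  induction f with
  | zero => intro g st s hf; omega
  | succ f ih =>
    intro g st s hf hg
    cases g with
    | zero => omega
    | succ g =>
      cases st with
      | nil => rfl
      | cons u st' =>
        rw [pvLoopA, pvLoopA]
        by_cases hu : u ∈ s
        · have hcu : PySem.Set.contains s u = true := by
            simpa [PySem.Set.contains] using hu
          simp only [hcu, if_pos]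
          exact ih g st' s (by simp at hf; omega) (by simp at hg; omega)
        · have hcu : PySem.Set.contains s u = false := by
            simpa [PySem.Set.contains] using hu
          simp only [hcu, Bool.false_eq_true, if_false]
          have hadd : PySem.Set.add s u = s ++ [u] := by
            simp [PySem.Set.add, PySem.Set.contains, hu]
          rw [hadd]
          have hdrop := pvC_drop child_map s u hu
          have hlen : (((pvChildren child_map u).filter
              (fun v => !(PySem.Set.contains (s ++ [u]) v))).reverse).length
              ≤ (pvChildren child_map u).length := by
            rw [List.length_reverse]; exact List.length_filter_le _ _
          apply ih
          · simp only [List.length_cons, List.length_append] at hf ⊢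
            omega
          · simp only [List.length_cons, List.length_append] at hg ⊢
            omega

-- main bridge: running the stack loop on cs ++ st equals folding the recursive visit over cs
lemma pvMain (child_map : List (Int × List Int)) (start : Int) :
    ∀ (k : Nat) (cs st : List Int) (s : PySem.Set Int) (f g h : Nat),
      (∀ x ∈ cs, x ∈ pvUniv child_map start) →
      pvM child_map start s ≤ k →
      cs.length + st.length + pvC child_map s < f →
      st.length + pvC child_map s < g →
      k < h →
      pvLoopA child_map f (cs ++ st) s
        = pvLoopA child_map g st (cs.foldl (fun s v => pvVisit child_map h v s) s) := by
  intro k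
  induction k using Nat.strong_induction_on with
  | _ k IH =>
    intro cs
    induction cs with
    | nil =>
      intro st s f g h _ _ hf hg _
      simp only [List.nil_append, List.foldl_nil]
      exact pvLoopA_fuel child_map f g st s (by simpa using hf) hg
    | cons c cs' ihcs =>
      intro st s f g h hU hm hf hg hk
      have hcU : c ∈ pvUniv child_map start := hU c (by simp)
      cases f with
      | zero => omega
      | succ f0 =>
      cases h with
      | zero => omega
      | succ h1 =>
      simp only [List.cons_append, List.foldl_cons]
      rw [pvLoopA]
      by_cases hc : c ∈ s
      · have hcc : PySem.Set.contains s c = true := by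
          simpa [PySem.Set.contains] using hc
        rw [if_pos hcc, pvVisit_of_mem child_map (h1 + 1) c s hc]
        exact ihcs st s f0 g (h1 + 1) (fun x hx => hU x (by simp [hx])) hm
          (by simp at hf ⊢; omega) hg hk
      · have hcc : PySem.Set.contains s c = false := by
          simp [PySem.Set.contains, List.contains_eq_mem, hc]
        rw [if_neg (by simp [PySem.Set.contains, List.contains_eq_mem, hc])]
        have hadd : PySem.Set.add s c = s ++ [c] := by
          simp [PySem.Set.add, PySem.Set.contains, List.contains_eq_mem, hc]
        simp only [hadd]
        -- the pushed block
        set Rc := ((pvChildren child_map c).filter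
            (fun v => !(PySem.Set.contains (s ++ [c]) v))).reverse with hRc
        have hRlen : Rc.length ≤ (pvChildren child_map c).length := by
          rw [hRc, List.length_reverse]; exact List.length_filter_le _ _
        have hdropC := pvC_drop child_map s c hc
        have hk' : pvM child_map start (s ++ [c]) < k :=
          lt_of_lt_of_le (pvM_drop child_map start s c hcU hc) hm
        have hRU : ∀ x ∈ Rc, x ∈ pvUniv child_map start := by
          intro x hx
          rw [hRc, List.mem_reverse] at hx
          have hx' := List.mem_of_mem_filter hx
          have := pvChildren_mem child_map c x hx'
          simp only [pvUniv, List.mem_toFinset, List.mem_cons]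
          exact Or.inr this
        -- outer IH: consume the pushed block Rc
        have step1 := IH (pvM child_map start (s ++ [c])) hk' Rc (cs' ++ st)
          (s ++ [c]) f0 f0 h1 hRU le_rfl
          (by simp only [List.length_append, List.length_cons] at hf ⊢; omega)
          (by simp only [List.length_append, List.length_cons] at hf ⊢; omega)
          (by omega)
        rw [step1]
        -- the fold over Rc is exactly visit of c
        have hfilt : Rc.foldl (fun s v => pvVisit child_map h1 v s) (s ++ [c])
            = pvVisit child_map (h1 + 1) c s := by
          rw [pvVisit_succ, if_neg (by simp [PySem.Set.contains, List.contains_eq_mem, hc]),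
            hadd, hRc]
          have : ((pvChildren child_map c).filter
              (fun v => !(PySem.Set.contains (s ++ [c]) v))).reverse
              = ((pvChildren child_map c).reverse).filter
                  (fun v => !((s ++ [c]).contains v)) := by
            simp [PySem.Set.contains, List.filter_reverse]
          rw [this]
          exact pvFold_filter child_map h1 (s ++ [c]) ((pvChildren child_map c).reverse)
            (s ++ [c]) (fun x hx => hx)
        rw [hfilt]
        -- inner IH: continue with cs'
        set S1 := pvVisit child_map (h1 + 1) c s with hS1
        have hS1sup : ∀ x ∈ s, x ∈ S1 := fun x hx =>
          pvVisit_mono child_map (h1 + 1) c s x hx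
        have hCle : pvC child_map S1 ≤ pvC child_map s :=
          pvC_mono child_map s S1 hS1sup
        have hMle : pvM child_map start S1 ≤ k :=
          le_trans (pvM_mono child_map start s S1 hS1sup) hm
        exact ihcs st S1 f0 g (h1 + 1) (fun x hx => hU x (by simp [hx])) hMle
          (by simp only [List.length_cons] at hf ⊢; omega)
          (by omega) hk

lemma pvLenSum (l : List (Int × List Int)) :
    (l.map (fun p => p.2.length)).sum ≤ (l.flatMap (fun q => q.1 :: q.2)).length := by
  induction l with
  | nil => simp
  | cons p rest ih =>
    simp only [List.map_cons, List.sum_cons, List.flatMap_cons,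
      List.length_append, List.length_cons]
    omega

lemma pvLoopA_nil (child_map : List (Int × List Int)) (f : Nat) (s : PySem.Set Int) :
    pvLoopA child_map f [] s = s := by
  cases f <;> rfl

-- ===== VERDICT (by name: the statement is the Claim_ definition above) =====
theorem collect_rooted_subtree_nodes_spec : Claim_equal_collect_rooted_subtree_nodes := by
  intro child_map start _
  unfold Spec_collect_rooted_subtree_nodes collect_rooted_subtree_nodes
    collect_rooted_subtree_nodes_alt
  have hC0 : pvC child_map PySem.Set.empty
      = (child_map.map (fun p => p.2.length)).sum := by
    simp [pvC, PySem.Set.empty]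
  have hlensum := pvLenSum child_map
  have hM0 : pvM child_map start PySem.Set.empty < pvFuelB child_map := by
    have h1 : pvM child_map start PySem.Set.empty
        ≤ (start :: child_map.flatMap (fun p => p.1 :: p.2)).length :=
      le_trans (Finset.card_le_card (Finset.filter_subset _ _))
        (List.toFinset_card_le _)
    simp only [List.length_cons] at h1
    simp only [pvFuelB]
    omega
  have hmain := pvMain child_map start (pvM child_map start PySem.Set.empty) [start] []
    PySem.Set.empty (pvFuelA child_map) (pvFuelA child_map) (pvFuelB child_map)
    (by intro x hx; simp only [List.mem_singleton] at hx; simp [hx, pvUniv])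
    le_rfl
    (by simp only [List.length_cons, List.length_nil, pvFuelA, hC0]; omega)
    (by simp only [List.length_nil, pvFuelA, hC0]; omega)
    hM0
  simp only [List.append_nil, List.foldl_cons, List.foldl_nil] at hmain
  rw [hmain, pvLoopA_nil]
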